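-- pv_equiv track=rewrite | github.com/Flood1993/ProjectEuler | p105.py | condition_ii
-- ===== SOURCE A (Python) =====
-- def condition_ii(number_set):
--     total_elems = len(number_set)
--
--     small_subset_size = 1
--     while 2*small_subset_size + 1 <= total_elems:
--         bigger_subset_size = small_subset_size + 1
--
--         if sum(number_set[:bigger_subset_size]) < sum(number_set[-small_subset_size:]):
--             return False
--
--         small_subset_size = small_subset_size + 1
--
--     return True
-- ===== SOURCE B (Python) =====
-- def condition_ii(number_set):
--     n = len(number_set)
--     prefix = [0]
--     for x in number_set:
--         prefix.append(prefix[-1] + x)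
--     total = prefix[n]
--     for k in range(1, (n - 1) // 2 + 1):
--         if prefix[k + 1] < total - prefix[n - k]:
--             return False
--     return True
-- ===== Notes on version B (the rewrite author's own statement) =====
-- stated objective: faster
-- what changed: Replaces the per-iteration slice-and-sum (O(n) work per k) with a prefix-sum table built once, so each comparison is an O(1) lookup.
import Mathlib
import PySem

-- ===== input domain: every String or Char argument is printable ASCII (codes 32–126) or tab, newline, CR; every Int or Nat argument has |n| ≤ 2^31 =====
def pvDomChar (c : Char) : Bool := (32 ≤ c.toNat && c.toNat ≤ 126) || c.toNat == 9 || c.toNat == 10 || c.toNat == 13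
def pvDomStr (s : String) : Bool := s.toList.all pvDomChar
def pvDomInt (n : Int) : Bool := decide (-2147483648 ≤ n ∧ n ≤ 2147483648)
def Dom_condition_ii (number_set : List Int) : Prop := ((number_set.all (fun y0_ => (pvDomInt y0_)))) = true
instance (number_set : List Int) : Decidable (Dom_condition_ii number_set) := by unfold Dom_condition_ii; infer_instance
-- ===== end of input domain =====

-- B replaces A's per-iteration slice sums with a prefix-sum table built once (O(n) instead of O(n^2)).

-- ===== PORT A =====
-- the while loop: state = small_subset_size (k); runs while 2*k + 1 <= len(number_set)
def condLoopA (number_set : List Int) (k : Nat) : Bool :=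
  if 2 * k + 1 ≤ number_set.length then
    -- sum(number_set[:k+1]) < sum(number_set[-k:])
    if (PySem.List.slice number_set none (some ((k : Int) + 1))).sum <
        (PySem.List.slice number_set (some (-(k : Int))) none).sum then
      false
    else
      condLoopA number_set (k + 1)
  else
    true
termination_by number_set.length - k
decreasing_by omega

def condition_ii (number_set : List Int) : Bool :=
  condLoopA number_set 1

-- ===== PORT B =====
def condition_ii_alt (number_set : List Int) : Bool :=
  let n := number_set.length
  -- prefix = [0]; for x in number_set: prefix.append(prefix[-1] + x)
  let pref := number_set.foldl (fun acc x => acc ++ [PySem.List.pyGetD acc (-1) 0 + x]) [0]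
  let total := PySem.List.pyGetD pref (n : Int) 0
  -- for k in range(1, (n-1)//2 + 1): if prefix[k+1] < total - prefix[n-k]: return False
  (PySem.List.pyRange 1 (PySem.Int.floordiv ((n : Int) - 1) 2 + 1) 1).all
    (fun k => !(decide (PySem.List.pyGetD pref (k + 1) 0 <
                        total - PySem.List.pyGetD pref ((n : Int) - k) 0)))

-- ===== PRECONDITION & SPEC =====
def Spec_condition_ii (number_set : List Int) (out : Bool) : Prop := out = condition_ii_alt number_set
instance (number_set : List Int) (out : Bool) : Decidable (Spec_condition_ii number_set out) := by unfold Spec_condition_ii; infer_instance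

-- ===== CLAIM (what is proved, stated in full; the proofs are below) =====
def Claim_equal_condition_ii : Prop := ∀ (number_set : List Int), Dom_condition_ii number_set → Spec_condition_ii number_set (condition_ii number_set)

-- ===== LEMMAS AND PROOFS =====

-- B's prefix-building fold is List.scanl (·+·)
lemma foldl_pref_eq_scanl (xs pre : List Int) (v : Int) :
    xs.foldl (fun acc x => acc ++ [PySem.List.pyGetD acc (-1) 0 + x]) (pre ++ [v])
      = pre ++ xs.scanl (· + ·) v := by
  induction xs generalizing pre v with
  | nil => simp
  | cons x xs ih =>
    simp only [List.foldl_cons, List.scanl_cons, PySem.List.pyGetD_neg_one_append_singleton]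
    rw [ih (pre ++ [v]) (v + x)]
    simp

lemma scanl_getD_sum (xs : List Int) (c : Int) (m : Nat) (hm : m ≤ xs.length) :
    (xs.scanl (· + ·) c).getD m 0 = c + (xs.take m).sum := by
  induction xs generalizing c m with
  | nil =>
    have : m = 0 := Nat.le_zero.mp hm
    subst this; simp
  | cons x xs ih =>
    cases m with
    | zero => simp
    | succ m =>
      simp only [List.scanl_cons, List.getD_cons_succ, List.take_succ_cons, List.sum_cons]
      rw [ih (c + x) m (by simpa using hm)]
      ring

-- the prefix table lookup, at a Nat index ≤ n
lemma pref_getD (xs : List Int) (m : Nat) (hm : m ≤ xs.length) :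
    PySem.List.pyGetD (xs.foldl (fun acc x => acc ++ [PySem.List.pyGetD acc (-1) 0 + x]) [0])
      ((m : Nat) : Int) 0 = (xs.take m).sum := by
  have h := foldl_pref_eq_scanl xs [] 0
  simp only [List.nil_append] at h
  rw [h, PySem.List.pyGetD_natCast, scanl_getD_sum xs 0 m hm, zero_add]

-- A's loop from state k equals B's "all" over the remaining range
lemma loopA_eq_all (xs : List Int) (k : Nat) (hk : 1 ≤ k) :
    condLoopA xs k =
      (PySem.List.pyRange (k : Int) (PySem.Int.floordiv ((xs.length : Int) - 1) 2 + 1) 1).all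
        (fun j => !(decide (PySem.List.pyGetD
              (xs.foldl (fun acc x => acc ++ [PySem.List.pyGetD acc (-1) 0 + x]) [0]) (j + 1) 0 <
            PySem.List.pyGetD
              (xs.foldl (fun acc x => acc ++ [PySem.List.pyGetD acc (-1) 0 + x]) [0])
              ((xs.length : Int)) 0 -
            PySem.List.pyGetD
              (xs.foldl (fun acc x => acc ++ [PySem.List.pyGetD acc (-1) 0 + x]) [0])
              ((xs.length : Int) - j) 0))) := by
  generalize hfuel : xs.length - k = fuel
  induction fuel generalizing k with
  | zero =>
    rw [condLoopA]
    have hno : ¬ (2 * k + 1 ≤ xs.length) := by omega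
    rw [if_neg hno]
    rw [PySem.List.pyRange_one_eq_nil ?_, List.all_nil]
    have : PySem.Int.floordiv ((xs.length : Int) - 1) 2 < (k : Int) := by
      rw [PySem.Int.floordiv_lt_iff_lt_mul (by omega : (0:Int) < 2)]
      omega
    omega
  | succ fuel ih =>
    rw [condLoopA]
    by_cases h : 2 * k + 1 ≤ xs.length
    · rw [if_pos h]
      have hkb : (k : Int) < PySem.Int.floordiv ((xs.length : Int) - 1) 2 + 1 := by
        have : (k : Int) ≤ PySem.Int.floordiv ((xs.length : Int) - 1) 2 := by
          rw [PySem.Int.le_floordiv_iff_mul_le (by omega : (0:Int) < 2)]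
          omega
        omega
      rw [PySem.List.pyRange_one_cons hkb, List.all_cons]
      -- head predicate: the two tests agree
      have hk1 : PySem.List.pyGetD
          (xs.foldl (fun acc x => acc ++ [PySem.List.pyGetD acc (-1) 0 + x]) [0]) ((k : Int) + 1) 0
          = (xs.take (k + 1)).sum := by
        have := pref_getD xs (k + 1) (by omega)
        push_cast at this
        exact this
      have htot : PySem.List.pyGetD
          (xs.foldl (fun acc x => acc ++ [PySem.List.pyGetD acc (-1) 0 + x]) [0]) ((xs.length : Int)) 0
          = xs.sum := by
        have := pref_getD xs xs.length (by omega)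
        simpa using this
      have hnk : PySem.List.pyGetD
          (xs.foldl (fun acc x => acc ++ [PySem.List.pyGetD acc (-1) 0 + x]) [0]) ((xs.length : Int) - (k : Int)) 0
          = (xs.take (xs.length - k)).sum := by
        have := pref_getD xs (xs.length - k) (by omega)
        rw [← this]
        congr 1
        push_cast [Nat.cast_sub (by omega : k ≤ xs.length)]
        ring
      have hdrop : (xs.drop (xs.length - k)).sum = xs.sum - (xs.take (xs.length - k)).sum := by
        have := List.sum_take_add_sum_drop xs (xs.length - k)
        linarith
      have hsliceL : PySem.List.slice xs none (some ((k : Int) + 1)) = xs.take (k + 1) := by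
        have := PySem.List.slice_to_natCast xs (k + 1)
        push_cast at this
        exact this
      have hsliceR : PySem.List.slice xs (some (-(k : Int))) none = xs.drop (xs.length - k) :=
        PySem.List.slice_from_neg_natCast xs k (by omega)
      rw [hsliceL, hsliceR, hk1, htot, hnk, hdrop]
      by_cases hc : (xs.take (k + 1)).sum < xs.sum - (xs.take (xs.length - k)).sum
      · simp [hc]
      · simp only [hc, decide_false, Bool.not_false, Bool.true_and]
        rw [if_neg not_false]
        have := ih (k + 1) (by omega) (by omega)
        rw [this]
        simp only [htot]
        push_cast
        ring_nf
    · rw [if_neg h]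
      rw [PySem.List.pyRange_one_eq_nil ?_, List.all_nil]
      have : PySem.Int.floordiv ((xs.length : Int) - 1) 2 < (k : Int) := by
        rw [PySem.Int.floordiv_lt_iff_lt_mul (by omega : (0:Int) < 2)]
        omega
      omega

-- ===== VERDICT (by name: the statement is the Claim_ definition above) =====
theorem condition_ii_spec : Claim_equal_condition_ii := by
  intro xs _
  unfold Spec_condition_ii condition_ii condition_ii_alt
  simpa using loopA_eq_all xs 1 (le_refl 1)
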